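-- pv_equiv track=rewrite | github.com/pypi-data/pypi-mirror-400 | packages/rosettes/rosettes-0.1.0-py3-none-any.whl/rosettes/lexers/_scanners.py | scan_whitespace
-- ===== SOURCE A (Python) =====
-- WHITESPACE: frozenset[str] = frozenset(" \t\n\r\f\v")
--
-- def scan_whitespace(code: str, pos: int) -> tuple[int, int]:
--     """Scan whitespace, returning (new_pos, newline_count).
--
--     Returns:
--         Tuple of (position after whitespace, number of newlines encountered).
--     """
--     length = len(code)
--     newlines = 0
--     while pos < length and code[pos] in WHITESPACE:
--         if code[pos] == "\n":
--             newlines += 1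
--         pos += 1
--     return pos, newlines
-- ===== SOURCE B (Python) =====
-- WHITESPACE = frozenset(" \t\n\r\f\v")
--
--
-- def scan_whitespace(code: str, pos: int) -> tuple[int, int]:
--     """Scan whitespace, returning (new_pos, newline_count)."""
--     rest = code[pos:]
--     end = pos + (len(rest) - len(rest.lstrip(" \t\n\r\f\v")))
--     return end, code.count("\n", pos, end)
-- ===== Notes on version B (the rewrite author's own statement) =====
-- stated objective: idiomatic
-- what changed: Eliminates the hand-written character loop entirely: B slices the tail, measures the whitespace run as len(rest)-len(rest.lstrip(chars)), and counts newlines with a ranged str.count - pure library/string-arithmetic, no explicit scan.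
-- outside the precondition, e.g. on scan_whitespace(' ', -1): A returns (1, 0), B returns (0, 0)
import Mathlib
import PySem

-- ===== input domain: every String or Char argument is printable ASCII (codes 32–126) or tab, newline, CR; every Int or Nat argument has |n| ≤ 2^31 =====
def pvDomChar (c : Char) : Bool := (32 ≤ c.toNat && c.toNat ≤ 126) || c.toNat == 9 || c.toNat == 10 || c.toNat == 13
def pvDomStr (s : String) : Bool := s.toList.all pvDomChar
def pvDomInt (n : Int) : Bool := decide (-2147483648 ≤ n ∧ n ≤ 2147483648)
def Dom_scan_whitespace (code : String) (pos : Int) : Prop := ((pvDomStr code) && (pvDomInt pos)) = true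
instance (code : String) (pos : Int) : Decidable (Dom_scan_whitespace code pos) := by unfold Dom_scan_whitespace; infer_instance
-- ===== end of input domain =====

-- B replaces A's hand-written scanning loop by string-arithmetic over library passes:
-- whitespace-run length via lstrip, newlines via a ranged count (objective: idiomatic; equal value on all positions 0 ≤ pos).

-- ===== PORT A =====
def WHITESPACE : List Char := [' ', '\t', '\n', '\r', Char.ofNat 12, Char.ofNat 11]

-- the while loop of A; 'none' from pyGet? is Python's IndexError (only reachable at pos < -len, outside Pre_)
def scanWsLoop (cs : List Char) (length : Int) (pos : Int) (newlines : Int) : Int × Int :=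
  if _h : pos < length then
    match PySem.List.pyGet? cs pos with
    | none => (pos, newlines)   -- IndexError in Python; unreachable inside Pre_
    | some c =>
      if WHITESPACE.contains c then
        scanWsLoop cs length (pos + 1) (if c = '\n' then newlines + 1 else newlines)
      else (pos, newlines)
  else (pos, newlines)
termination_by (length - pos).toNat
decreasing_by omega

def scan_whitespace (code : String) (pos : Int) : Int × Int :=
  scanWsLoop code.toList (code.toList.length : Int) pos 0

-- ===== PORT B =====
def wsB (c : Char) : Bool :=
  c == ' ' || c == '\t' || c == '\n' || c == '\r' || c == Char.ofNat 12 || c == Char.ofNat 11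

def scan_whitespace_alt (code : String) (pos : Int) : Int × Int :=
  let cs := code.toList
  -- rest = code[pos:]
  let rest := PySem.List.slice cs (some pos) none
  -- rest.lstrip(" \t\n\r\f\v") is exactly dropWhile of membership in that char set (hand port; exact)
  let e := pos + ((rest.length : Int) - ((rest.dropWhile wsB).length : Int))
  -- code.count("\n", pos, e) for a single-char needle is exactly the count of '\n' in code[pos:e] (hand port; exact)
  (e, ((PySem.List.slice cs (some pos) (some e)).count '\n' : Int))

-- ===== PRECONDITION & SPEC =====
-- Pre_ restricts to the scanner's natural domain of nonnegative cursor positions; on negative pos A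
-- scans via Python's negative-index wraparound (possibly re-scanning the string start), an accidental
-- behaviour no caller relies on, and below -len both Pythons raise IndexError.
def Pre_scan_whitespace (code : String) (pos : Int) : Prop := 0 ≤ pos
instance (code : String) (pos : Int) : Decidable (Pre_scan_whitespace code pos) := by
  unfold Pre_scan_whitespace; infer_instance

def pvWitness_scan_whitespace : String × Int := ("  \n x", 0)

def Spec_scan_whitespace (code : String) (pos : Int) (out : Int × Int) : Prop :=
  out = scan_whitespace_alt code pos
instance (code : String) (pos : Int) (out : Int × Int) : Decidable (Spec_scan_whitespace code pos out) := by
  unfold Spec_scan_whitespace; infer_instance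

-- ===== CLAIM (what is proved, stated in full; the proofs are below) =====
def Claim_equal_scan_whitespace : Prop :=
  ∀ (code : String) (pos : Int), Dom_scan_whitespace code pos →
    Pre_scan_whitespace code pos →
    Spec_scan_whitespace code pos (scan_whitespace code pos)

-- ===== LEMMAS AND PROOFS =====

lemma contains_eq_wsB (c : Char) : WHITESPACE.contains c = wsB c := by
  apply Bool.eq_iff_iff.mpr
  simp [WHITESPACE, wsB, List.contains_eq_mem, List.mem_cons]
  tauto

-- A's interleaved loop computes takeWhile-length and its newline count on the suffix at pos
lemma scanWsLoop_eq (cs : List Char) (pos nl : Int) (hpos : 0 ≤ pos) :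
    scanWsLoop cs (cs.length : Int) pos nl =
      (pos + (((cs.drop pos.toNat).takeWhile wsB).length : Int),
       nl + (((cs.drop pos.toNat).takeWhile wsB).count '\n' : Int)) := by
  induction hn : cs.length - pos.toNat generalizing pos nl with
  | zero =>
    have hge : ¬ pos < (cs.length : Int) := by omega
    have hdrop : cs.drop pos.toNat = [] := List.drop_eq_nil_of_le (by omega)
    rw [scanWsLoop, dif_neg hge, hdrop]
    simp
  | succ n ih =>
    have hlt : pos < (cs.length : Int) := by omega
    have hnat : pos.toNat < cs.length := by omega
    have hget : PySem.List.pyGet? cs pos = some cs[pos.toNat] :=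
      PySem.List.pyGet?_eq_some_getElem cs hpos hlt
    have hdrop : cs.drop pos.toNat = cs[pos.toNat] :: cs.drop (pos.toNat + 1) :=
      List.drop_eq_getElem_cons hnat
    have htn : (pos + 1).toNat = pos.toNat + 1 := by omega
    rw [scanWsLoop, dif_pos hlt, hget]
    simp only [contains_eq_wsB]
    by_cases hws : wsB cs[pos.toNat]
    · rw [if_pos hws, ih (pos + 1) _ (by omega) (by omega)]
      rw [hdrop, List.takeWhile_cons, hws, htn]
      simp only [if_true, List.length_cons, List.count_cons, Prod.mk.injEq]
      constructor
      · push_cast; ring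
      · by_cases hc : cs[pos.toNat] = '\n'
        · rw [if_pos hc, if_pos (by simp [hc])]
          push_cast; ring
        · rw [if_neg hc, if_neg (by simp [hc])]
          push_cast; ring
    · rw [if_neg hws, hdrop, List.takeWhile_cons, if_neg hws]
      simp

-- ===== VERDICT (by name: the statement is the Claim_ definition above) =====
theorem scan_whitespace_spec : Claim_equal_scan_whitespace := by
  intro code pos _ hpre
  unfold Pre_scan_whitespace at hpre
  unfold Spec_scan_whitespace scan_whitespace scan_whitespace_alt
  dsimp only
  rw [scanWsLoop_eq code.toList pos 0 hpre]
  set cs := code.toList with hcs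
  rw [PySem.List.slice_from cs hpre]
  set rest := cs.drop pos.toNat with hrest
  have hsplit : (rest.takeWhile wsB).length + (rest.dropWhile wsB).length = rest.length := by
    rw [← List.length_append, List.takeWhile_append_dropWhile]
  have he : pos + ((rest.length : Int) - ((rest.dropWhile wsB).length : Int))
      = pos + (((rest.takeWhile wsB).length : Int)) := by omega
  have hslice : PySem.List.slice cs (some pos)
      (some (pos + (((rest.takeWhile wsB).length : Int))))
      = rest.takeWhile wsB := by
    rw [PySem.List.slice_toNat cs hpre (by omega)]
    have hsub : (pos + (((rest.takeWhile wsB).length : Int))).toNat - pos.toNat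
        = (rest.takeWhile wsB).length := by omega
    rw [hsub, ← hrest]
    exact (List.prefix_iff_eq_take.mp (List.takeWhile_prefix wsB)).symm
  rw [he, hslice]
  simp
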